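-- pv_equiv track=rewrite | github.com/TheUltimateOptimist/aoc2023 | 2023/12/12.py | isStartValid
-- ===== SOURCE A (Python) =====
-- def minify(chars: str) -> str:
--     new_str = ""
--     seen_dot = False
--     for i in range(len(chars)):
--         if chars[i] == "." and len(new_str) > 0:
--             seen_dot = True
--         elif chars[i] == "#" or chars[i] == "?":
--             if seen_dot:
--                 new_str += "."
--             new_str += chars[i]
--             seen_dot = False
--     return new_str
--
-- def isStartValid(chars: str, counts: list[int]) -> bool:
--     is_complete = not "?" in chars
--     chars = minify(chars.split("?")[0])
--     sections = chars.split(".")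
--     if is_complete and len(sections) != len(counts):
--         return False
--     for i, section in enumerate(sections):
--         if i >= len(counts):
--             return False
--         if is_complete and len(section) !=  counts[i]:
--             return False
--         if i < len(sections) - 1 and len(section) != counts[i]:
--             return False
--         if i == len(sections) - 1 and len(section) > counts[i]:
--             return False
--     return True
-- ===== SOURCE B (Python) =====
-- def isStartValid(chars: str, counts: list[int]) -> bool:
--     # Single pass over the prefix before the first '?': no normalized string or
--     # sections list is built; runs of '#' are validated lazily against counts.
--     is_complete = "?" not in chars
--     p = chars.split("?")[0]
--     idx = 0          # number of fully validated groups
--     cur = 0          # length of the current (ongoing) '#' run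
--     pending = None   # a finished run not yet validated (it may still be the last)
--     for ch in p:
--         if ch == "#":
--             if cur == 0 and pending is not None:
--                 # a new run begins, so the pending run is not the last: exact match
--                 if idx >= len(counts) or pending != counts[idx]:
--                     return False
--                 idx += 1
--                 pending = None
--             cur += 1
--         elif ch == ".":
--             if cur > 0:
--                 pending = cur
--                 cur = 0
--         # any other character is ignored (it neither extends nor breaks a run)
--     last = cur if cur > 0 else (0 if pending is None else pending)
--     if idx >= len(counts):
--         return False
--     if is_complete:
--         return idx == len(counts) - 1 and last == counts[idx]
--     return last <= counts[idx]
-- ===== Notes on version B (the rewrite author's own statement) =====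
-- stated objective: faster
-- what changed: Replaces the minify-then-split pipeline (which builds a normalized string by repeated concatenation, splits it into a sections list and then loops over it with index checks) by one direct scan of the prefix before the first '?' that tracks the current '#'-run length and lazily validates each finished run against counts as soon as a new run starts, handling the final run (and the phantom empty group) in an epilogue.
import Mathlib
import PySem

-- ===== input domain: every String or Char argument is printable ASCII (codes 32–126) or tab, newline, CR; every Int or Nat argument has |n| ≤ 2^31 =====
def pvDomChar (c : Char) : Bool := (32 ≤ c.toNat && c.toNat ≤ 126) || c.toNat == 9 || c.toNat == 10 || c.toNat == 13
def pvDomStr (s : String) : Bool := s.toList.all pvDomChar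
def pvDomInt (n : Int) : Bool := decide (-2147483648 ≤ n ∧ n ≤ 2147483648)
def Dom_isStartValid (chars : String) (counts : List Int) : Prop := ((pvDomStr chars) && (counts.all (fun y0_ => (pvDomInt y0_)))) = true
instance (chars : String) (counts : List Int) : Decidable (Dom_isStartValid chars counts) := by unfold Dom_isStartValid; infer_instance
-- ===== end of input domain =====

-- B replaces A's minify-then-split pipeline by one direct scan of the '?'-free prefix that
-- validates '#'-runs against counts lazily (objective: faster, by a constant factor / one pass).


-- ===== PORT A =====
-- minify(chars): loop over the characters, building new_str (here an accumulator list) and seen_dot.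
def minifyA : List Char → List Char → Bool → List Char
  | [], acc, _ => acc
  | c :: rest, acc, seen =>
    if c = '.' ∧ 0 < acc.length then minifyA rest acc true
    else if c = '#' ∨ c = '?' then minifyA rest (acc ++ (if seen then ['.'] else []) ++ [c]) false
    else minifyA rest acc seen

-- the 'for i, section in enumerate(sections)' loop with its four early returns (n = len(sections))
def aLoop (counts : List Int) (is_complete : Bool) (n : Nat) : Nat → List (List Char) → Bool
  | _, [] => true
  | i, s :: rest =>
    if counts.length ≤ i then false
    else if is_complete && !((s.length : Int) == PySem.List.pyGetD counts (i : Int) 0) then false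
    else if decide (i < n - 1) && !((s.length : Int) == PySem.List.pyGetD counts (i : Int) 0) then false
    else if i == n - 1 && decide (PySem.List.pyGetD counts (i : Int) 0 < (s.length : Int)) then false
    else aLoop counts is_complete n (i + 1) rest

def isStartValid (chars : String) (counts : List Int) : Bool :=
  let is_complete := !(PySem.Str.isIn "?" chars)
  -- chars.split("?")[0]: split with a non-empty separator always yields a non-empty list, so [0] is headD
  let p := (PySem.Chars.splitOn chars.toList ['?']).headD []
  let m := minifyA p [] false
  let sections := PySem.Chars.splitOn m ['.']
  if is_complete && !(sections.length == counts.length) then false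
  else aLoop counts is_complete sections.length 0 sections

-- ===== PORT B =====
-- the single for-loop over p plus the epilogue after it (state: idx, cur, pending)
def bLoop (counts : List Int) (is_complete : Bool) : List Char → Nat → Nat → Option Nat → Bool
  | [], idx, cur, pending =>
    let last : Nat := if 0 < cur then cur else (match pending with | none => 0 | some v => v)
    if counts.length ≤ idx then false
    else if is_complete then
      decide (idx = counts.length - 1) && ((last : Int) == PySem.List.pyGetD counts (idx : Int) 0)
    else decide ((last : Int) ≤ PySem.List.pyGetD counts (idx : Int) 0)
  | ch :: rest, idx, cur, pending =>
    if ch = '#' then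
      match pending with
      | some v =>
        if cur = 0 then
          if counts.length ≤ idx || !((v : Int) == PySem.List.pyGetD counts (idx : Int) 0) then false
          else bLoop counts is_complete rest (idx + 1) 1 none
        else bLoop counts is_complete rest idx (cur + 1) (some v)
      | none => bLoop counts is_complete rest idx (cur + 1) none
    else if ch = '.' then
      if 0 < cur then bLoop counts is_complete rest idx 0 (some cur)
      else bLoop counts is_complete rest idx 0 pending
    else bLoop counts is_complete rest idx cur pending

def isStartValid_alt (chars : String) (counts : List Int) : Bool :=
  let is_complete := !(PySem.Str.isIn "?" chars)
  let p := (PySem.Chars.splitOn chars.toList ['?']).headD []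
  bLoop counts is_complete p 0 0 none

-- ===== PRECONDITION & SPEC =====
def Spec_isStartValid (chars : String) (counts : List Int) (out : Bool) : Prop := out = isStartValid_alt chars counts
instance (chars : String) (counts : List Int) (out : Bool) : Decidable (Spec_isStartValid chars counts out) := by unfold Spec_isStartValid; infer_instance

-- ===== CLAIM (what is proved, stated in full; the proofs are below) =====
def Claim_equal_isStartValid : Prop := ∀ (chars : String) (counts : List Int), Dom_isStartValid chars counts → Spec_isStartValid chars counts (isStartValid chars counts)

-- ===== LEMMAS AND PROOFS =====

-- Chars.splitOn with a single-character separator is Mathlib's splitOnP.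
theorem splitOn_go_single (c : Char) : ∀ (fuel : Nat) (l cur : List Char) (acc : List (List Char)), l.length < fuel →
    PySem.Chars.splitOn.go [c] fuel l cur acc
      = acc.reverse ++ (List.splitOnP (· == c) l).modifyHead (cur.reverse ++ ·) := by
  intro fuel
  induction fuel with
  | zero => intro l cur acc h; omega
  | succ f ih =>
    intro l cur acc h
    cases l with
    | nil => simp [PySem.Chars.splitOn.go]
    | cons x rest =>
      simp only [PySem.Chars.splitOn.go]
      by_cases hx : x = c
      · subst hx
        rw [if_pos (by simp [List.isPrefixOf])]
        have hd : List.drop ([x].length) (x :: rest) = rest := by simp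
        rw [hd, ih rest [] (cur.reverse :: acc) (by simpa using Nat.lt_of_succ_lt_succ h)]
        have hid : ∀ (L : List (List Char)), List.modifyHead (fun x => x) L = L := by
          intro L; cases L <;> simp
        simp [List.splitOnP_cons, hid]
      · rw [if_neg (by simp [List.isPrefixOf]; exact fun h => hx h.symm)]
        rw [ih rest (x :: cur) acc (by simpa using Nat.lt_of_succ_lt_succ h)]
        rw [List.splitOnP_cons]
        simp only [beq_iff_eq, hx, if_false]
        obtain ⟨y, ys, hy⟩ := List.exists_cons_of_ne_nil (List.splitOnP_ne_nil (· == c) rest)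
        simp [hy, List.modifyHead]

theorem splitOn_single (c : Char) (s : List Char) :
    PySem.Chars.splitOn s [c] = List.splitOnP (· == c) s := by
  have h := splitOn_go_single c (s.length + 1) s [] [] (by omega)
  have hid : ∀ (L : List (List Char)), List.modifyHead (fun x => x) L = L := by
    intro L; cases L <;> simp
  simpa [PySem.Chars.splitOn, hid] using h

-- the head of a '?'-split contains no '?'
theorem not_mem_headD_splitOnP (c : Char) : ∀ (l : List Char), c ∉ (List.splitOnP (· == c) l).headD [] := by
  intro l
  induction l with
  | nil => simp [List.splitOnP_nil]
  | cons x rest ih =>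
    rw [List.splitOnP_cons]
    by_cases hx : x = c
    · simp [hx]
    · simp only [beq_iff_eq, hx, if_false]
      obtain ⟨y, ys, hy⟩ := List.exists_cons_of_ne_nil (List.splitOnP_ne_nil (· == c) rest)
      rw [hy]
      rw [hy] at ih
      simp only [List.modifyHead, List.headD_cons] at *
      intro h
      rcases List.mem_cons.mp h with h | h
      · exact hx h.symm
      · exact ih h

-- ---- abstract descriptions of the two computations ----

-- run lengths still ahead of B's loop, given its state (phantom 0 group when none)
def fut : List Char → Nat → Option Nat → List Nat
  | [], cur, pending => [if 0 < cur then cur else (match pending with | none => 0 | some v => v)]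
  | ch :: rest, cur, pending =>
    if ch = '#' then
      match pending with
      | some v => if cur = 0 then v :: fut rest 1 none else fut rest (cur + 1) (some v)
      | none => fut rest (cur + 1) none
    else if ch = '.' then
      if 0 < cur then fut rest 0 (some cur) else fut rest 0 pending
    else fut rest cur pending

-- the common checker: earlier groups must match exactly; the last group is checked with ≤
-- (or with = plus an index check when complete)
def chk (counts : List Int) (complete : Bool) : Nat → List Nat → Bool
  | _, [] => true
  | idx, [l] =>
    if counts.length ≤ idx then false
    else if complete then decide (idx = counts.length - 1) && ((l : Int) == counts.getD idx 0)
    else decide ((l : Int) ≤ counts.getD idx 0)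
  | idx, l :: l' :: ls =>
    if counts.length ≤ idx then false
    else if (l : Int) = counts.getD idx 0 then chk counts complete (idx + 1) (l' :: ls) else false

theorem fut_ne_nil : ∀ (p : List Char) (cur : Nat) (pending : Option Nat), fut p cur pending ≠ [] := by
  intro p
  induction p with
  | nil => intro cur pending; simp [fut]
  | cons ch rest ih =>
    intro cur pending
    simp only [fut]
    by_cases h1 : ch = '#'
    · rw [if_pos h1]
      cases pending with
      | some v => dsimp only; split_ifs <;> first | exact ih _ _ | simp
      | none => dsimp only; exact ih _ _
    · rw [if_neg h1]
      by_cases h2 : ch = '.'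
      · rw [if_pos h2]
        split_ifs <;> exact ih _ _
      · rw [if_neg h2]
        exact ih _ _

-- B's loop computes chk on its future run lengths
theorem bLoop_eq_chk (counts : List Int) (complete : Bool) :
    ∀ (p : List Char) (idx cur : Nat) (pending : Option Nat),
      bLoop counts complete p idx cur pending = chk counts complete idx (fut p cur pending) := by
  intro p
  induction p with
  | nil =>
    intro idx cur pending
    simp only [bLoop, fut, chk]
    rw [PySem.List.pyGetD_natCast]
  | cons ch rest ih =>
    intro idx cur pending
    simp only [bLoop, fut]
    by_cases h1 : ch = '#'
    · rw [if_pos h1, if_pos h1]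
      cases pending with
      | none => dsimp only; exact ih _ _ _
      | some v =>
        dsimp only
        by_cases h2 : cur = 0
        · rw [if_pos h2, if_pos h2]
          obtain ⟨l, ls, hl⟩ := List.exists_cons_of_ne_nil (fut_ne_nil rest 1 none)
          rw [ih, hl]
          simp only [chk]
          rw [PySem.List.pyGetD_natCast, List.getD_eq_getElem?_getD]
          by_cases h3 : counts.length ≤ idx
          · simp [h3]
          · by_cases h4 : (v : Int) = counts[idx]?.getD 0 <;> simp [h3, h4]
        · rw [if_neg h2, if_neg h2]
          exact ih _ _ _
    · rw [if_neg h1, if_neg h1]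
      by_cases h2 : ch = '.'
      · rw [if_pos h2, if_pos h2]
        split_ifs <;> exact ih _ _ _
      · rw [if_neg h2, if_neg h2]
        exact ih _ _ _

-- ---- A's side: minify, sections, run lengths ----

-- continuation of minify once new_str is non-empty (no '?' present)
def cont2 : List Char → Bool → List Char
  | [], _ => []
  | c :: rest, seen =>
    if c = '#' then (if seen then ['.'] else []) ++ '#' :: cont2 rest false
    else if c = '.' then cont2 rest true
    else cont2 rest seen

-- minify from the initial state (no '?' present)
def h2 : List Char → List Char
  | [] => []
  | c :: rest => if c = '#' then '#' :: cont2 rest false else h2 rest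

def rep (n : Nat) : List Char := List.replicate n '#'

-- render a non-empty list of run lengths as a dot-separated string
def render : List Nat → List Char
  | [] => []
  | [n] => rep n
  | n :: m :: ls => rep n ++ '.' :: render (m :: ls)

def trender (ls : List Nat) : List Char := match ls with
  | [] => []
  | _ :: _ => '.' :: render ls

theorem render_cons (n : Nat) (ls : List Nat) : render (n :: ls) = rep n ++ trender ls := by
  cases ls <;> simp [render, trender, rep]

theorem minifyA_ne (p : List Char) : ∀ (acc : List Char) (seen : Bool), acc ≠ [] → '?' ∉ p →
    minifyA p acc seen = acc ++ cont2 p seen := by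
  induction p with
  | nil => intro acc seen _ _; simp [minifyA, cont2]
  | cons c rest ih =>
    intro acc seen hacc hq
    have hq' : '?' ∉ rest := fun h => hq (List.mem_cons_of_mem _ h)
    have hc : c ≠ '?' := fun h => hq (h ▸ List.mem_cons_self)
    simp only [minifyA, cont2]
    by_cases h1 : c = '.'
    · rw [if_pos ⟨h1, by cases acc <;> simp_all⟩, ih acc true hacc hq', h1]
      simp
    · rw [if_neg (by simp [h1])]
      by_cases h2 : c = '#'
      · rw [if_pos (Or.inl h2), ih _ false (by simp) hq', h2]
        simp
      · rw [if_neg (by simp [h2, hc]), ih acc seen hacc hq']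
        simp [h1, h2]

theorem minifyA_nil (p : List Char) (hq : '?' ∉ p) : minifyA p [] false = h2 p := by
  induction p with
  | nil => simp [minifyA, h2]
  | cons c rest ih =>
    have hq' : '?' ∉ rest := fun h => hq (List.mem_cons_of_mem _ h)
    have hc : c ≠ '?' := fun h => hq (h ▸ List.mem_cons_self)
    simp only [minifyA, h2]
    rw [if_neg (by simp)]
    by_cases h2c : c = '#'
    · rw [if_pos (Or.inl h2c), minifyA_ne rest _ false (by simp) hq']
      simp [h2c]
    · rw [if_neg (by simp [h2c, hc]), ih hq', if_neg h2c]

-- the joint induction: cont2 renders exactly the runs that fut still sees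
theorem cont2_fut : ∀ (p : List Char), '?' ∉ p →
    (∀ cur pending, 0 < cur → ∃ e later,
        fut p cur pending = (cur + e) :: later ∧ cont2 p false = rep e ++ trender later)
    ∧ (∀ v, ∃ rest, fut p 0 (some v) = v :: rest ∧ cont2 p true = trender rest) := by
  intro p
  induction p with
  | nil =>
    intro _
    refine ⟨fun cur pending hcur => ⟨0, [], ?_, ?_⟩, fun v => ⟨[], ?_, ?_⟩⟩
    · simp [fut, hcur]
    · simp [cont2, rep, trender]
    · simp [fut]
    · simp [cont2, trender]
  | cons c rest ih =>
    intro hq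
    have hq' : '?' ∉ rest := fun h => hq (List.mem_cons_of_mem _ h)
    obtain ⟨ih1, ih2⟩ := ih hq'
    by_cases h1 : c = '#'
    · constructor
      · intro cur pending hcur
        obtain ⟨e, later, hf, hcont⟩ := ih1 (cur + 1) pending (by omega)
        refine ⟨e + 1, later, ?_, ?_⟩
        · simp only [fut]
          rw [if_pos h1]
          have harith : cur + 1 + e = cur + (e + 1) := by omega
          cases pending with
          | none => dsimp only; rw [hf, harith]
          | some v =>
            dsimp only
            rw [if_neg (by omega : ¬ cur = 0), hf, harith]
        · simp only [cont2]
          rw [if_pos h1, hcont]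
          simp [rep, List.replicate_succ]
      · intro v
        obtain ⟨e, later, hf, hcont⟩ := ih1 1 none (by omega)
        refine ⟨(1 + e) :: later, ?_, ?_⟩
        · simp only [fut]
          rw [if_pos h1]
          rw [if_pos trivial, hf]
        · simp only [cont2]
          rw [if_pos h1, hcont]
          simp only [trender]
          rw [render_cons]
          simp [trender, rep, List.replicate_succ, Nat.add_comm 1 e]
    · by_cases hd : c = '.'
      · constructor
        · intro cur pending hcur
          obtain ⟨rest', hf, hcont⟩ := ih2 cur
          refine ⟨0, rest', ?_, ?_⟩
          · simp only [fut]
            rw [if_neg h1, if_pos hd, if_pos hcur, hf]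
            simp
          · simp only [cont2]
            rw [if_neg h1, if_pos hd, hcont]
            simp [rep]
        · intro v
          obtain ⟨rest', hf, hcont⟩ := ih2 v
          refine ⟨rest', ?_, ?_⟩
          · simp only [fut]
            rw [if_neg h1, if_pos hd, if_neg (by omega)]
            exact hf
          · simp only [cont2]
            rw [if_neg h1, if_pos hd]
            exact hcont
      · constructor
        · intro cur pending hcur
          obtain ⟨e, later, hf, hcont⟩ := ih1 cur pending hcur
          refine ⟨e, later, ?_, ?_⟩
          · simp only [fut]
            rw [if_neg h1, if_neg hd]
            exact hf
          · simp only [cont2]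
            rw [if_neg h1, if_neg hd]
            exact hcont
        · intro v
          obtain ⟨rest', hf, hcont⟩ := ih2 v
          refine ⟨rest', ?_, ?_⟩
          · simp only [fut]
            rw [if_neg h1, if_neg hd]
            exact hf
          · simp only [cont2]
            rw [if_neg h1, if_neg hd]
            exact hcont

theorem h2_render (p : List Char) (hq : '?' ∉ p) : h2 p = render (fut p 0 none) := by
  induction p with
  | nil => simp [h2, fut, render, rep]
  | cons c rest ih =>
    have hq' : '?' ∉ rest := fun h => hq (List.mem_cons_of_mem _ h)
    by_cases h1 : c = '#'
    · obtain ⟨e, later, hf, hcont⟩ := (cont2_fut rest hq').1 1 none (by omega)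
      simp only [h2, fut]
      rw [if_pos h1, if_pos h1]
      rw [show (0 : Nat) + 1 = 1 from rfl, hf, hcont, render_cons]
      simp [rep, trender, List.replicate_succ, Nat.add_comm 1 e]
    · by_cases hd : c = '.'
      · simp only [h2, fut]
        rw [if_neg h1, if_neg h1, if_pos hd, if_neg (by omega)]
        exact ih hq'
      · simp only [h2, fut]
        rw [if_neg h1, if_neg h1, if_neg hd]
        exact ih hq'

-- splitting a rendered run list on '.' recovers exactly the runs
theorem splitOnP_nodot_append (xs ys : List Char) (hxs : '.' ∉ xs) :
    List.splitOnP (· == '.') (xs ++ ys) = (List.splitOnP (· == '.') ys).modifyHead (xs ++ ·) := by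
  induction xs with
  | nil =>
    obtain ⟨y, ys', hy⟩ := List.exists_cons_of_ne_nil (List.splitOnP_ne_nil (· == '.') ys)
    simp [hy, List.modifyHead]
  | cons x xs ih =>
    have hx : x ≠ '.' := fun h => hxs (h ▸ List.mem_cons_self)
    have hxs' : '.' ∉ xs := fun h => hxs (List.mem_cons_of_mem _ h)
    rw [List.cons_append, List.splitOnP_cons, if_neg (by simp [hx]), ih hxs']
    obtain ⟨y, ys', hy⟩ := List.exists_cons_of_ne_nil (List.splitOnP_ne_nil (· == '.') ys)
    simp [hy, List.modifyHead]

theorem splitOnP_render : ∀ (ls : List Nat), ls ≠ [] →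
    List.splitOnP (· == '.') (render ls) = ls.map rep := by
  intro ls
  induction ls with
  | nil => simp
  | cons n ms ih =>
    intro _
    cases ms with
    | nil =>
      simp only [render]
      rw [show rep n = rep n ++ [] by simp,
        splitOnP_nodot_append _ _ (by simp [rep, List.mem_replicate])]
      simp [List.splitOnP_nil, List.modifyHead]
    | cons m ls' =>
      rw [render, splitOnP_nodot_append _ _ (by simp [rep, List.mem_replicate]),
        List.splitOnP_cons, if_pos (by simp), ih (by simp)]
      simp [List.modifyHead]

theorem aLoop_cons (counts : List Int) (complete : Bool) (n i : Nat) (s : List Char)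
    (rest : List (List Char)) :
    aLoop counts complete n i (s :: rest) =
      (if counts.length ≤ i then false
       else if complete && !((s.length : Int) == PySem.List.pyGetD counts (i : Int) 0) then false
       else if decide (i < n - 1) && !((s.length : Int) == PySem.List.pyGetD counts (i : Int) 0) then false
       else if i == n - 1 && decide (PySem.List.pyGetD counts (i : Int) 0 < (s.length : Int)) then false
       else aLoop counts complete n (i + 1) rest) := by
  simp only [aLoop]

-- A's indexed loop is the common checker (n is the fixed total number of sections)
theorem aLoop_eq_chk (counts : List Int) (complete : Bool) :
    ∀ (ss : List (List Char)) (idx : Nat), ss ≠ [] →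
      (complete = true → idx + ss.length = counts.length) →
      aLoop counts complete (idx + ss.length) idx ss = chk counts complete idx (ss.map (fun s => s.length)) := by
  intro ss
  induction ss with
  | nil => simp
  | cons s rest ih =>
    intro idx _ hcomp
    cases rest with
    | nil =>
      simp only [aLoop, chk, List.map]
      rw [PySem.List.pyGetD_natCast, List.getD_eq_getElem?_getD]
      by_cases hlen : counts.length ≤ idx
      · simp [hlen]
      · cases complete with
        | true =>
          have hl : idx + 1 = counts.length := hcomp rfl
          by_cases heq : ((s.length : Int)) = counts[idx]?.getD 0
          · have hnlt : ¬ counts[idx]?.getD 0 < (s.length : Int) := by omega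
            simp [heq, show idx = counts.length - 1 by omega]
          · simp [hlen, heq]
        | false =>
          by_cases hlt : counts[idx]?.getD 0 < (s.length : Int)
          · have : ¬ ((s.length : Int) ≤ counts[idx]?.getD 0) := by omega
            simp [hlen, hlt, this]
          · have hle : ((s.length : Int)) ≤ counts[idx]?.getD 0 := by omega
            simp [hlen, hlt, hle]
    | cons s' rest' =>
      have harr : idx + (s :: s' :: rest').length = (idx + 1) + (s' :: rest').length := by
        simp; omega
      rw [harr]
      rw [aLoop_cons]
      simp only [chk, List.map]
      rw [PySem.List.pyGetD_natCast, List.getD_eq_getElem?_getD]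
      have hlt1 : idx < idx + 1 + (s' :: rest').length - 1 := by simp; omega
      have hne1 : (idx == idx + 1 + (s' :: rest').length - 1) = false := by
        simp; omega
      by_cases hlen : counts.length ≤ idx
      · simp [hlen]
      · by_cases heq : ((s.length : Int)) = counts[idx]?.getD 0
        · rw [ih (idx + 1) (by simp) (fun h => by have := hcomp h; simp at this ⊢; omega)]
          simp [hlen, heq]
        · simp [hlen, heq]
          intro _ h _
          exact absurd h (by omega)

theorem chk_len_mismatch (counts : List Int) :
    ∀ (ls : List Nat) (idx : Nat), ls ≠ [] → idx + ls.length ≠ counts.length →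
      chk counts true idx ls = false := by
  intro ls
  induction ls with
  | nil => simp
  | cons l ms ih =>
    intro idx _ hne
    cases ms with
    | nil =>
      simp only [chk]
      by_cases h : counts.length ≤ idx
      · simp [h]
      · have : idx ≠ counts.length - 1 := by simp at hne; omega
        simp [h, this]
    | cons m ls' =>
      simp only [chk]
      by_cases h : counts.length ≤ idx
      · simp [h]
      · simp only [h, if_false]
        split_ifs with h2
        · exact ih (idx + 1) (by simp) (by simp at hne ⊢; omega)
        · rfl

theorem map_length_map_rep (ls : List Nat) : (ls.map rep).map (fun s => s.length) = ls := by
  simp [rep, List.map_map, Function.comp_def]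

-- ===== VERDICT (by name: the statement is the Claim_ definition above) =====
theorem isStartValid_spec : Claim_equal_isStartValid := by
  intro chars counts _
  unfold Spec_isStartValid isStartValid isStartValid_alt
  simp only []
  generalize (!(PySem.Str.isIn "?" chars)) = cpl
  have hq : '?' ∉ (PySem.Chars.splitOn chars.toList ['?']).headD [] := by
    rw [splitOn_single]
    exact not_mem_headD_splitOnP '?' chars.toList
  generalize hP : (PySem.Chars.splitOn chars.toList ['?']).headD [] = p at hq ⊢
  have hm : minifyA p [] false = render (fut p 0 none) :=
    (minifyA_nil p hq).trans (h2_render p hq)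
  have hsec : PySem.Chars.splitOn (minifyA p [] false) ['.'] = (fut p 0 none).map rep := by
    rw [hm, splitOn_single, splitOnP_render _ (fut_ne_nil p 0 none)]
  rw [hsec, bLoop_eq_chk]
  generalize hL : fut p 0 none = ls at *
  have hne : ls ≠ [] := hL ▸ fut_ne_nil p 0 none
  cases cpl with
  | false =>
    rw [Bool.false_and, if_neg (by simp)]
    have := aLoop_eq_chk counts false (ls.map rep) 0 (by simpa using hne) (by simp)
    rw [Nat.zero_add, map_length_map_rep] at this
    rw [List.length_map] at this ⊢
    exact this
  | true =>
    by_cases hlen : ls.length = counts.length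
    · rw [Bool.true_and, if_neg (by simp [hlen])]
      have h := aLoop_eq_chk counts true (ls.map rep) 0 (by simpa using hne)
        (fun _ => by simp [hlen])
      rw [Nat.zero_add, map_length_map_rep] at h
      exact h
    · rw [Bool.true_and, if_pos (by simp [hlen])]
      rw [chk_len_mismatch counts ls 0 hne (by simpa using hlen)]
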